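-- pv_equiv track=rewrite | github.com/kitamura-tetsuo/auto-coder | src/auto_coder/conflict_resolver.py | parse_semver_to_tuple
-- ===== SOURCE A (Python) =====
-- from typing import Any, Dict, List, Optional
--
-- def parse_semver_to_tuple(v: str) -> Optional[tuple]:
--     """Parse a semver-ish string to a comparable tuple of ints.
--     - Strips common range operators (^, ~, >=, <=, >, <, =)
--     - Ignores pre-release/build metadata
--     - Returns None if parsing fails
--     """
--     if not isinstance(v, str) or not v:
--         return None
--     # Strip range operators and spaces
--     s = v.strip()
--     while s and s[0] in ("^", "~", ">", "<", "=", "v"):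
--         s = s[1:]
--     # Remove leading = if any remain
--     s = s.lstrip("=")
--     # Split on hyphen (prerelease) and plus (build)
--     s = s.split("+", 1)[0].split("-", 1)[0]
--     parts = s.split(".")
--     nums: List[int] = []
--     for p in parts:
--         if p.isdigit():
--             nums.append(int(p))
--         else:
--             # Stop at first non-numeric segment
--             break
--     if not nums:
--         return None
--     while len(nums) < 3:
--         nums.append(0)
--     return tuple(nums[:3])
-- ===== SOURCE B (Python) =====
-- def parse_semver_to_tuple(v):
--     """Parse a semver-ish string to a comparable tuple of ints.
--     Single left-to-right scan: strip whitespace and operator prefix, then read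
--     up to three dot-separated digit runs directly, stopping at '+'/'-' metadata.
--     """
--     if not isinstance(v, str) or not v:
--         return None
--     s = v.strip().lstrip("^~><=v")
--     n = len(s)
--     nums = []
--     i = 0
--     while len(nums) < 3 and i < n and s[i].isdigit():
--         j = i
--         while j < n and s[j].isdigit():
--             j += 1
--         if j < n and s[j] not in ".+-":
--             break  # digit run has trailing junk in its segment: not a numeric segment
--         nums.append(int(s[i:j]))
--         if j >= n or s[j] != ".":
--             break  # end of string, or pre-release/build metadata: done
--         i = j + 1
--     if not nums:
--         return None
--     nums += [0] * (3 - len(nums))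
--     return tuple(nums)
-- ===== Notes on version B (the rewrite author's own statement) =====
-- stated objective: alternative
-- what changed: Replaces A's pipeline of string surgery (operator while-loop, lstrip, two splits on '+'/'-', split on '.', isdigit test per segment) with a single left-to-right index scan that reads up to three dot-separated digit runs directly and stops at metadata or junk.
import Mathlib
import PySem

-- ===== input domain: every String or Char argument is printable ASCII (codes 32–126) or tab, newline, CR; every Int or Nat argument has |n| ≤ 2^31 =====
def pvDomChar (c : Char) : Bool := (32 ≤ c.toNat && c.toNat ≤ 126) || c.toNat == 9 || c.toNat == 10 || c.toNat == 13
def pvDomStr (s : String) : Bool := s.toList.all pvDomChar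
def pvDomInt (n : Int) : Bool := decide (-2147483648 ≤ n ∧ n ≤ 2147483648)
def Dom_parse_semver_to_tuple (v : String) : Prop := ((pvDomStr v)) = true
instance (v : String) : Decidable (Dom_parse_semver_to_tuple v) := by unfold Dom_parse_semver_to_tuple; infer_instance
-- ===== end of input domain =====

-- B reads the version by one left-to-right scan (digit runs between dots) instead of A's
-- strip/split pipeline; same return value (alternative decomposition, no speed claim).

-- ===== PORT A =====
-- while s and s[0] in ("^", "~", ">", "<", "=", "v"): s = s[1:]
def pvA_stripOps : List Char → List Char
  | [] => []
  | c :: rest =>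
    if c = '^' ∨ c = '~' ∨ c = '>' ∨ c = '<' ∨ c = '=' ∨ c = 'v' then pvA_stripOps rest
    else c :: rest

-- s.lstrip("=")  (lstrip with a char set, hand-ported: drop leading chars of the set; exact)
def pvA_lstripEq (s : List Char) : List Char := s.dropWhile (fun c => c = '=')

-- for p in parts: if p.isdigit(): nums.append(int(p)) else: break
-- int(p) is guarded by p.isdigit(), so on the ASCII domain it never raises; .getD 0 is unreachable
def pvA_collect : List (List Char) → List Int → List Int
  | [], nums => nums
  | p :: rest, nums =>
    if PySem.Chars.strIsdigit p then pvA_collect rest (nums ++ [(PySem.Int.ofChars? p).getD 0])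
    else nums

-- while len(nums) < 3: nums.append(0)
def pvA_pad (nums : List Int) : List Int :=
  if nums.length < 3 then pvA_pad (nums ++ [0]) else nums
  termination_by 3 - nums.length
  decreasing_by simp_all; omega

def parse_semver_to_tuple (v : String) : Option (Int × Int × Int) :=
  if v.toList = [] then none
  else
    let s0 := PySem.Chars.strip v.toList
    let s1 := pvA_lstripEq (pvA_stripOps s0)
    let s2 := (PySem.Chars.splitOnMax s1 ['+'] 1).headD []   -- s.split("+", 1)[0]
    let s3 := (PySem.Chars.splitOnMax s2 ['-'] 1).headD []   -- .split("-", 1)[0]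
    let parts := PySem.Chars.splitOn s3 ['.']
    let nums := pvA_collect parts []
    if nums = [] then none
    else
      match pvA_pad nums with
      | a :: b :: c :: _ => some (a, b, c)
      | _ => none  -- unreachable: pvA_pad returns a list of length ≥ 3

-- ===== PORT B =====
def pvB_ops : List Char := ['^', '~', '>', '<', '=', 'v']

def pvB_isStop (c : Char) : Bool := c = '.' || c = '+' || c = '-'

-- inner while: advance j over the digit run; returns (digit run, remainder)
def pvB_readDigits : List Char → List Char × List Char
  | [] => ([], [])
  | c :: rest =>
    if PySem.Chars.isdigit c then
      let (d, r) := pvB_readDigits rest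
      (c :: d, r)
    else ([], c :: rest)

-- outer while: while len(nums) < 3 and next char is a digit
def pvB_scan (s : List Char) (nums : List Int) : List Int :=
  if nums.length < 3 then
    match s with
    | [] => nums
    | c :: rest =>
      if PySem.Chars.isdigit c then
        match pvB_readDigits (c :: rest) with
        | (d, []) => nums ++ [(PySem.Int.ofChars? d).getD 0]
        | (d, x :: r') =>
          if ¬ (pvB_isStop x = true) then nums
          else if x = '.' then pvB_scan r' (nums ++ [(PySem.Int.ofChars? d).getD 0])
          else nums ++ [(PySem.Int.ofChars? d).getD 0]
      else nums
  else nums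
  termination_by 3 - nums.length
  decreasing_by simp_all; omega

def parse_semver_to_tuple_alt (v : String) : Option (Int × Int × Int) :=
  if v.toList = [] then none
  else
    -- v.strip().lstrip("^~><=v")  (lstrip with a char set hand-ported as dropWhile; exact)
    let s := (PySem.Chars.strip v.toList).dropWhile (fun c => pvB_ops.contains c)
    match pvB_scan s [] with                     -- nums += [0] * (3 - len(nums)); tuple(nums)
    | [] => none
    | [a] => some (a, 0, 0)
    | [a, b] => some (a, b, 0)
    | a :: b :: c :: _ => some (a, b, c)

-- ===== PRECONDITION & SPEC =====
def Spec_parse_semver_to_tuple (v : String) (out : Option (Int × Int × Int)) : Prop := out = parse_semver_to_tuple_alt v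
instance (v : String) (out : Option (Int × Int × Int)) : Decidable (Spec_parse_semver_to_tuple v out) := by unfold Spec_parse_semver_to_tuple; infer_instance

-- ===== CLAIM (what is proved, stated in full; the proofs are below) =====
def Claim_equal_parse_semver_to_tuple : Prop := ∀ (v : String), Dom_parse_semver_to_tuple v → Spec_parse_semver_to_tuple v (parse_semver_to_tuple v)

-- ===== LEMMAS AND PROOFS =====

-- the two prefix-stripping phases agree
theorem pv_prefix_eq (l : List Char) :
    pvA_lstripEq (pvA_stripOps l) = l.dropWhile (fun c => pvB_ops.contains c) := by
  induction l with
  | nil => simp [pvA_stripOps, pvA_lstripEq]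
  | cons c rest ih =>
    by_cases h : c = '^' ∨ c = '~' ∨ c = '>' ∨ c = '<' ∨ c = '=' ∨ c = 'v'
    · rw [List.dropWhile_cons_of_pos (by simp [pvB_ops]; tauto)]
      simpa [pvA_stripOps, h] using ih
    · rw [List.dropWhile_cons_of_neg (by simp [pvB_ops]; tauto)]
      simp [pvA_stripOps, h, pvA_lstripEq, List.dropWhile_cons]
      tauto

-- direct recursive description of splitting on a single separator character
def pvSplitD (c : Char) (pre : List Char) : List Char → List (List Char)
  | [] => [pre]
  | a :: rest => if a = c then pre :: pvSplitD c [] rest else pvSplitD c (pre ++ [a]) rest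

def pvNotPM (a : Char) : Bool := !(a = '+' : Bool) && !(a = '-' : Bool)

theorem pv_go0 (c : Char) (fuel : Nat) (l cur : List Char) (acc : List (List Char))
    (h : l.length ≤ fuel) :
    PySem.Chars.splitOnMax.go [c] fuel 0 l cur acc = acc.reverse ++ [cur.reverse ++ l] := by
  induction fuel generalizing l cur acc with
  | zero =>
    have : l = [] := by simpa using h
    subst this; simp [PySem.Chars.splitOnMax.go]
  | succ n ih =>
    cases l with
    | nil => simp [PySem.Chars.splitOnMax.go]
    | cons a rest => simp [PySem.Chars.splitOnMax.go]

theorem pv_go1 (c : Char) (fuel : Nat) (l cur : List Char) (acc : List (List Char))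
    (h : l.length ≤ fuel) :
    PySem.Chars.splitOnMax.go [c] fuel 1 l cur acc =
      acc.reverse ++ (cur.reverse ++ l.takeWhile (fun a => !(a = c : Bool))) ::
        (if l.dropWhile (fun a => !(a = c : Bool)) = [] then []
         else [(l.dropWhile (fun a => !(a = c : Bool))).tail]) := by
  induction fuel generalizing l cur acc with
  | zero =>
    have : l = [] := by simpa using h
    subst this; simp [PySem.Chars.splitOnMax.go]
  | succ n ih =>
    cases l with
    | nil => simp [PySem.Chars.splitOnMax.go]
    | cons a rest =>
      by_cases hc : a = c
      · subst hc
        simp only [PySem.Chars.splitOnMax.go]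
        rw [if_neg (by decide)]
        rw [if_pos (by simp [List.isPrefixOf])]
        simp only [List.length_cons] at h
        simp only [List.length_singleton, List.drop_one, List.tail_cons, Nat.sub_self]
        rw [pv_go0 _ n rest [] (cur.reverse :: acc) (by omega)]
        simp
      · simp only [PySem.Chars.splitOnMax.go]
        rw [if_neg (by decide)]
        rw [if_neg (by simp [List.isPrefixOf]; exact fun hh => hc hh.symm)]
        simp only [List.length_cons] at h
        rw [ih rest (a :: cur) acc (by omega)]
        simp [hc]

theorem pv_splitMax_head (c : Char) (l : List Char) :
    (PySem.Chars.splitOnMax l [c] 1).headD [] = l.takeWhile (fun a => !(a = c : Bool)) := by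
  unfold PySem.Chars.splitOnMax
  rw [if_neg (by decide)]
  have h1 : Int.toNat 1 = 1 := by decide
  rw [h1, pv_go1 c (l.length + 1) l [] [] (by omega)]
  simp

theorem pv_splitOn_go (c : Char) (fuel : Nat) (l cur : List Char) (acc : List (List Char))
    (h : l.length ≤ fuel) :
    PySem.Chars.splitOn.go [c] fuel l cur acc = acc.reverse ++ pvSplitD c cur.reverse l := by
  induction fuel generalizing l cur acc with
  | zero =>
    have : l = [] := by simpa using h
    subst this; simp [PySem.Chars.splitOn.go, pvSplitD]
  | succ n ih =>
    cases l with
    | nil => simp [PySem.Chars.splitOn.go, pvSplitD]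
    | cons a rest =>
      simp only [List.length_cons] at h
      by_cases hc : a = c
      · subst hc
        simp only [PySem.Chars.splitOn.go]
        rw [if_pos (by simp [List.isPrefixOf])]
        simp only [List.length_singleton, List.drop_one, List.tail_cons]
        rw [ih rest [] (cur.reverse :: acc) (by omega)]
        simp [pvSplitD]
      · simp only [PySem.Chars.splitOn.go]
        rw [if_neg (by simp [List.isPrefixOf]; exact fun hh => hc hh.symm)]
        rw [ih rest (a :: cur) acc (by omega)]
        simp [pvSplitD, hc]

theorem pv_splitOn_eq (c : Char) (l : List Char) :
    PySem.Chars.splitOn l [c] = pvSplitD c [] l := by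
  unfold PySem.Chars.splitOn
  rw [pv_splitOn_go c (l.length + 1) l [] [] (by omega)]
  simp

theorem pv_readDigits_eq (l : List Char) :
    pvB_readDigits l = (l.takeWhile PySem.Chars.isdigit, l.dropWhile PySem.Chars.isdigit) := by
  induction l with
  | nil => simp [pvB_readDigits]
  | cons c rest ih =>
    by_cases h : PySem.Chars.isdigit c
    · simp [pvB_readDigits, h, ih]
    · simp [pvB_readDigits, h]

theorem pv_collect_acc (segs : List (List Char)) (nums : List Int) :
    pvA_collect segs nums = nums ++ pvA_collect segs [] := by
  induction segs generalizing nums with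
  | nil => simp [pvA_collect]
  | cons p rest ih =>
    by_cases h : PySem.Chars.strIsdigit p
    · rw [pvA_collect, if_pos h, pvA_collect, if_pos h, ih (nums ++ [(PySem.Int.ofChars? p).getD 0]), ih ([] ++ [(PySem.Int.ofChars? p).getD 0])]
      simp
    · simp [pvA_collect, h]

theorem pv_splitD_append (c : Char) (pre d t : List Char) (hd : ∀ x ∈ d, ¬ x = c) :
    pvSplitD c pre (d ++ t) = pvSplitD c (pre ++ d) t := by
  induction d generalizing pre with
  | nil => simp
  | cons a d' ih =>
    have ha : ¬ a = c := hd a (by simp)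
    simp only [List.cons_append, pvSplitD, if_neg ha]
    rw [ih (pre ++ [a]) (fun x hx => hd x (by simp [hx]))]
    simp

theorem pv_splitD_head (c : Char) (pre t : List Char) :
    ∃ tl, pvSplitD c pre t = (pre ++ t.takeWhile (fun a => !(a = c : Bool))) :: tl := by
  induction t generalizing pre with
  | nil => exact ⟨[], by simp [pvSplitD]⟩
  | cons a t' ih =>
    by_cases h : a = c
    · exact ⟨pvSplitD c [] t', by simp [pvSplitD, h]⟩
    · obtain ⟨tl, htl⟩ := ih (pre ++ [a])
      exact ⟨tl, by simp [pvSplitD, h, htl]⟩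

theorem pv_digit_aux (x : Char) (h : PySem.Chars.isdigit x = true) :
    pvNotPM x = true ∧ ¬ x = '.' := by
  simp only [PySem.Chars.isdigit] at h
  constructor
  · simp only [pvNotPM, Bool.and_eq_true, Bool.not_eq_true']
    constructor <;> { rw [decide_eq_false_iff_not]; intro hx; subst hx; revert h; decide }
  · intro hx; subst hx; revert h; decide

theorem pv_main (n : Nat) (l : List Char) (nums : List Int)
    (hl : l.length ≤ n) (hn : nums.length ≤ 3) :
    pvB_scan l nums =
      nums ++ (pvA_collect (pvSplitD '.' [] (l.takeWhile pvNotPM)) []).take (3 - nums.length) := by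
  induction n generalizing l nums with
  | zero =>
    have : l = [] := by simpa using hl
    subst this
    rw [pvB_scan]
    by_cases h3 : nums.length < 3
    · simp [h3, pvSplitD, pvA_collect, PySem.Chars.strIsdigit]
    · have h0 : 3 - nums.length = 0 := by omega
      simp [h3, h0]
  | succ n0 ih =>
    by_cases h3 : nums.length < 3
    case neg =>
      rw [pvB_scan.eq_def]
      have h0 : 3 - nums.length = 0 := by omega
      simp [h3, h0]
    case pos =>
    cases l with
    | nil => rw [pvB_scan]; simp [h3, pvSplitD, pvA_collect, PySem.Chars.strIsdigit]
    | cons c rest =>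
      by_cases hc : PySem.Chars.isdigit c
      case neg =>
        have hc' : PySem.Chars.isdigit c = false := by simpa using hc
        rw [pvB_scan]
        simp only [if_pos h3, hc', Bool.false_eq_true, ite_false]
        by_cases hpm : pvNotPM c = true
        · rw [List.takeWhile_cons_of_pos hpm]
          by_cases hdot : c = '.'
          · subst hdot
            simp [pvSplitD, pvA_collect, PySem.Chars.strIsdigit]
          · have : pvSplitD '.' [] (c :: List.takeWhile pvNotPM rest) =
                pvSplitD '.' ([] ++ [c]) (List.takeWhile pvNotPM rest) := by
              simp [pvSplitD, hdot]
            rw [this]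
            obtain ⟨tl, htl⟩ := pv_splitD_head '.' ([] ++ [c]) (List.takeWhile pvNotPM rest)
            rw [htl]
            have hbad : PySem.Chars.strIsdigit (([] ++ [c]) ++
                List.takeWhile (fun a => !(a = '.' : Bool)) (List.takeWhile pvNotPM rest)) = false := by
              simp only [PySem.Chars.strIsdigit, Bool.and_eq_false_iff]
              right
              rw [List.all_eq_false]
              exact ⟨c, by simp, by simp [hc']⟩
            rw [pvA_collect, if_neg (by simpa using hbad)]
            simp
        · rw [List.takeWhile_cons_of_neg (by simpa using hpm)]
          simp [pvSplitD, pvA_collect, PySem.Chars.strIsdigit]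
      case pos =>
        have hsplit : (c :: rest).takeWhile PySem.Chars.isdigit ++
            (c :: rest).dropWhile PySem.Chars.isdigit = c :: rest :=
          List.takeWhile_append_dropWhile
        set d := (c :: rest).takeWhile PySem.Chars.isdigit with hd
        set r := (c :: rest).dropWhile PySem.Chars.isdigit with hr
        have hdall : ∀ x ∈ d, PySem.Chars.isdigit x = true := fun x hx => List.mem_takeWhile_imp hx
        have hdne : d ≠ [] := by rw [hd]; simp [hc]
        have hdnotpm : ∀ x ∈ d, pvNotPM x = true := fun x hx => (pv_digit_aux x (hdall x hx)).1
        have hdnodot : ∀ x ∈ d, ¬ x = '.' := fun x hx => (pv_digit_aux x (hdall x hx)).2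
        have hIsd : PySem.Chars.strIsdigit d = true := by
          simp only [PySem.Chars.strIsdigit, Bool.and_eq_true, Bool.not_eq_true', List.all_eq_true]
          exact ⟨by simpa [List.isEmpty_iff] using hdne, hdall⟩
        have hTW : (c :: rest).takeWhile pvNotPM = d ++ r.takeWhile pvNotPM := by
          conv_lhs => rw [← hsplit]
          exact List.takeWhile_append_of_pos hdnotpm
        have hlen : d.length + r.length = rest.length + 1 := by
          have := congrArg List.length hsplit; simpa using this
        rw [pvB_scan]
        simp only [if_pos h3]
        rw [pv_readDigits_eq, ← hd, ← hr, if_pos hc]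
        cases hre : r with
        | nil =>
          show nums ++ [(PySem.Int.ofChars? d).getD 0] = _
          rw [hTW, hre]
          rw [List.takeWhile_nil, List.append_nil, show pvSplitD '.' [] d = pvSplitD '.' ([] ++ d) [] from
            by simpa using pv_splitD_append '.' [] d [] hdnodot]
          simp only [pvSplitD]
          have h31 : 3 - nums.length = (3 - (nums.length + 1)) + 1 := by omega
          simp [pvA_collect, hIsd, h31]
        | cons x r' =>
          show (if ¬ pvB_isStop x = true then nums
                else if x = '.' then pvB_scan r' (nums ++ [(PySem.Int.ofChars? d).getD 0])
                else nums ++ [(PySem.Int.ofChars? d).getD 0]) = _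
          have hcons : List.dropWhile PySem.Chars.isdigit (c :: rest) = x :: r' := by
            rw [← hr, hre]
          have hx : PySem.Chars.isdigit x = false := by
            have := List.head_dropWhile_not (l := (c :: rest)) (p := PySem.Chars.isdigit)
              (by simp [hcons])
            simpa [hcons] using this
          by_cases hxdot : x = '.'
          case pos =>
            subst hxdot
            rw [if_neg (by simp [pvB_isStop]), if_pos rfl]
            have hr'len : r'.length ≤ n0 := by
              have hd1 : 0 < d.length := List.length_pos_of_ne_nil hdne
              rw [hre] at hlen; simp at hlen
              simp at hl; omega
            rw [ih r' (nums ++ [(PySem.Int.ofChars? d).getD 0]) hr'len (by simp; omega)]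
            rw [hTW, hre]
            rw [List.takeWhile_cons_of_pos (by decide)]
            rw [pv_splitD_append '.' [] d ('.' :: List.takeWhile pvNotPM r') hdnodot]
            rw [show pvSplitD '.' ([] ++ d) ('.' :: List.takeWhile pvNotPM r') =
              ([] ++ d) :: pvSplitD '.' [] (List.takeWhile pvNotPM r') from by simp [pvSplitD]]
            rw [List.nil_append, pvA_collect, if_pos hIsd, pv_collect_acc]
            have h31 : 3 - nums.length = (3 - (nums.length + 1)) + 1 := by omega
            simp [h31]
            rw [pv_collect_acc _ [(PySem.Int.ofChars? d).getD 0]]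
            simp
          case neg =>
          by_cases hxpm : x = '+' ∨ x = '-'
          case pos =>
            have hstop : pvB_isStop x = true := by
              rcases hxpm with h | h <;> simp [pvB_isStop, h]
            rw [if_neg (by simp [hstop]), if_neg hxdot]
            rw [hTW, hre]
            rw [List.takeWhile_cons_of_neg (by rcases hxpm with h | h <;> simp [pvNotPM, h])]
            rw [List.append_nil, show pvSplitD '.' [] d = pvSplitD '.' ([] ++ d) [] from
              by simpa using pv_splitD_append '.' [] d [] hdnodot]
            simp only [pvSplitD]
            have h31 : 3 - nums.length = (3 - (nums.length + 1)) + 1 := by omega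
            simp [pvA_collect, hIsd, h31]
          case neg =>
            have hstop : pvB_isStop x = false := by
              simp only [pvB_isStop, Bool.or_eq_false_iff]
              refine ⟨⟨?_, ?_⟩, ?_⟩ <;> simp_all
            rw [if_pos (by simp [hstop])]
            have hxpm' : pvNotPM x = true := by
              simp only [pvNotPM, Bool.and_eq_true, Bool.not_eq_true']
              constructor <;> { rw [decide_eq_false_iff_not]; intro hh; exact hxpm (by tauto) }
            rw [hTW, hre, List.takeWhile_cons_of_pos hxpm']
            rw [pv_splitD_append '.' [] d (x :: List.takeWhile pvNotPM r') hdnodot]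
            have hsp : pvSplitD '.' ([] ++ d) (x :: List.takeWhile pvNotPM r') =
                pvSplitD '.' (([] ++ d) ++ [x]) (List.takeWhile pvNotPM r') := by
              simp [pvSplitD, hxdot]
            rw [hsp]
            obtain ⟨tl, htl⟩ := pv_splitD_head '.' (([] ++ d) ++ [x]) (List.takeWhile pvNotPM r')
            rw [htl]
            have hbad : PySem.Chars.strIsdigit ((([] ++ d) ++ [x]) ++
                List.takeWhile (fun a => !(a = '.' : Bool)) (List.takeWhile pvNotPM r')) = false := by
              simp only [PySem.Chars.strIsdigit, Bool.and_eq_false_iff]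
              right
              rw [List.all_eq_false]
              exact ⟨x, by simp, by simp [hx]⟩
            rw [pvA_collect, if_neg (by simpa using hbad)]
            simp

theorem pv_pad_one (a : Int) : pvA_pad [a] = [a, 0, 0] := by
  rw [pvA_pad, if_pos (by simp)]
  rw [show ([a] ++ [0]) = [a, 0] from rfl, pvA_pad, if_pos (by simp)]
  rw [show ([a, 0] ++ [0]) = [a, 0, 0] from rfl, pvA_pad, if_neg (by simp)]

theorem pv_pad_two (a b : Int) : pvA_pad [a, b] = [a, b, 0] := by
  rw [pvA_pad, if_pos (by simp)]
  rw [show ([a, b] ++ [0]) = [a, b, 0] from rfl, pvA_pad, if_neg (by simp)]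

theorem pv_pad_full (a b c : Int) (t : List Int) : pvA_pad (a :: b :: c :: t) = a :: b :: c :: t := by
  rw [pvA_pad, if_neg (by simp)]

-- ===== VERDICT (by name: the statement is the Claim_ definition above) =====
theorem parse_semver_to_tuple_spec : Claim_equal_parse_semver_to_tuple := by
  intro v _
  show parse_semver_to_tuple v = parse_semver_to_tuple_alt v
  unfold parse_semver_to_tuple parse_semver_to_tuple_alt
  by_cases hv : v.toList = []
  · rw [if_pos hv, if_pos hv]
  · rw [if_neg hv, if_neg hv]
    simp only []
    rw [pv_prefix_eq, pv_splitMax_head, pv_splitMax_head, List.takeWhile_takeWhile]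
    rw [show (fun a => decide ((!(a = '-' : Bool)) = true ∧ (!(a = '+' : Bool)) = true)) = pvNotPM from by
      funext a; simp [pvNotPM, Bool.and_comm]]
    rw [pv_splitOn_eq]
    set s := (PySem.Chars.strip v.toList).dropWhile (fun c => pvB_ops.contains c) with hs
    rw [pv_main s.length s [] (le_refl _) (by simp)]
    rw [List.nil_append]
    cases hL : pvA_collect (pvSplitD '.' [] (s.takeWhile pvNotPM)) [] with
    | nil => simp
    | cons a t =>
      rw [if_neg (by simp)]
      cases t with
      | nil => rw [pv_pad_one]; rfl
      | cons b t' =>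
        cases t' with
        | nil => rw [pv_pad_two]; rfl
        | cons c t'' => rw [pv_pad_full]; rfl
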